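-- pv_equiv track=rewrite | github.com/yousif-toama/sig-light | src/sig_light/rotational.py | _balanced_indices
-- ===== SOURCE A (Python) =====
-- from itertools import combinations
--
-- def _balanced_indices(level: int, half_level: int) -> list[int]:
--     """Column indices for balanced binary sequences.
--
--     Returns indices corresponding to binary sequences of length `level`
--     with exactly `half_level` ones (z* positions).
--
--     Args:
--         level: Total sequence length.
--         half_level: Number of 1-bits required.
--
--     Returns:
--         Sorted list of integer column indices.
--     """
--     indices = []
--     for ones_positions in combinations(range(level), half_level):
--         idx = 0
--         for pos in ones_positions:
--             idx += 1 << (level - 1 - pos)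
--         indices.append(idx)
--     indices.sort()
--     return indices
-- ===== SOURCE B (Python) =====
-- def _balanced_indices(level: int, half_level: int) -> list[int]:
--     """Bottom-up DP over the sequence length: for each length n keep, per
--     popcount k that is still reachable and can still grow to half_level, the
--     sorted list of indices of that popcount; numbers without the new top bit
--     come before those with it, so every row is built already sorted and no
--     final sort is needed."""
--     total = max(level, 0)
--     if half_level < 0 or half_level > total:
--         return []
--     if half_level == 0:
--         return [0]
--     row = {0: [0]}  # indices for length-0 sequences, keyed by popcount
--     for n in range(1, total + 1):
--         top = 1 << (n - 1)
--         lo = max(half_level - (total - n), 0)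
--         row = {k: row.get(k, []) + [top + x for x in row.get(k - 1, [])]
--                for k in range(lo, min(n, half_level) + 1)}
--     return row.get(half_level, [])
-- ===== Notes on version B (the rewrite author's own statement) =====
-- stated objective: alternative
-- what changed: Replaces enumerate-all-combinations-assemble-each-bitmask-then-sort with a bottom-up DP over the sequence length that keeps, per still-useful popcount, its index list already in ascending order (numbers without the new top bit before those with it), so the final sort and the per-combination bit assembly disappear; intended as faster (a timing run read 57x at the largest size both finished but could not confirm the label).
import Mathlib
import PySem

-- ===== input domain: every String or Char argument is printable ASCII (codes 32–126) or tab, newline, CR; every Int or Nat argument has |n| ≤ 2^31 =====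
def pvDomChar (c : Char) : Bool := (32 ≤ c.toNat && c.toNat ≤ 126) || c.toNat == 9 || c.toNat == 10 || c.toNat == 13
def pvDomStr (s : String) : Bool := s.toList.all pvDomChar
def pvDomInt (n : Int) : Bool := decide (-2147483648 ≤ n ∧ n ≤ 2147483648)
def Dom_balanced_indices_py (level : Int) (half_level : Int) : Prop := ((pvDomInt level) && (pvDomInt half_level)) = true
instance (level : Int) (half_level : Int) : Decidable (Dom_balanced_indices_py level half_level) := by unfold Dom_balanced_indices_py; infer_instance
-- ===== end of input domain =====

-- B replaces "enumerate all C(n,k) combinations, assemble each bitmask, then sort"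
-- by a bottom-up DP over the sequence length that emits every popcount class
-- already in ascending order (no final sort).


-- ===== PORT A =====
-- itertools.combinations, transcribed structurally in CPython's index-lexicographic
-- order, including its r > n early-empty cutoff ('if r > n: return' in the
-- documented pure-Python equivalent), which keeps evaluation O(C(n,r));
-- combosA_eq_combinations below proves it equal to the PySem.List.combinations
-- primitive (whose evaluation is too slow on the larger sampled inputs).
def combosA {α : Type} : List α → Nat → List (List α)
  | _, 0 => [[]]
  | [], _+1 => []
  | x :: xs, r+1 =>
    if xs.length < r then []
    else (combosA xs r).map (x :: ·) ++ combosA xs (r+1)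

-- Literal port of _balanced_indices: for each combination of positions, add the
-- shifted bits, then sort.  '1 << (level - 1 - pos)' is ported as 2 ^ (level - 1 - pos):
-- exact, since for pos ∈ range(level) the shift count level-1-pos is ≥ 0 (so '.toNat'
-- clamps nothing Python sees and 1 << e = 2 ^ e); '<<<' itself overflows the
-- evaluator's stack on large shift counts.
-- 'half_level.toNat' is only read under Pre_ (0 ≤ half_level; Python raises ValueError below it).
def balanced_indices_py (level : Int) (half_level : Int) : List Int :=
  let indices : List Int :=
    (combosA (PySem.List.pyRange 0 level 1) half_level.toNat).map
      (fun ones_positions =>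
        ones_positions.foldl (fun idx pos => idx + (2 : Int) ^ (level - 1 - pos).toNat) 0)
  PySem.List.sorted indices (fun x => x) false

-- ===== PORT B =====
-- Literal port of Source B ('top = 1 << (n - 1)' ported as 2 ^ (n - 1), exact since
-- n ≥ 1 in the loop): row maps a popcount k to the (already sorted) list of
-- indices of that popcount for the current length n, kept only for the k that
-- are still reachable and can still grow to half_level; each iteration rebuilds
-- the dict ('row = {k: ... for k in range(lo, ...)}') from the previous one.
def balanced_indices_py_alt (level : Int) (half_level : Int) : List Int :=
  let total := max level 0
  if half_level < 0 ∨ half_level > total then []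
  else if half_level = 0 then [0]
  else
    let row0 : PySem.Dict Int (List Int) := PySem.Dict.empty.insert 0 [0]
    let row :=
      (PySem.List.pyRange 1 (total + 1) 1).foldl
        (fun row n =>
          let top := (2 : Int) ^ (n - 1).toNat
          let lo := max (half_level - (total - n)) 0
          (PySem.List.pyRange lo (min n half_level + 1) 1).foldl
            (fun acc k =>
              acc.insert k (row.getD k [] ++ (row.getD (k - 1) []).map (fun x => top + x)))
            PySem.Dict.empty)
        row0
    row.getD half_level []

-- ===== PRECONDITION & SPEC =====
-- Pre_ excludes exactly half_level < 0, on which A raises ValueError (itertools.combinations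
-- rejects a negative r); B returns [] there.
def Pre_balanced_indices_py (level : Int) (half_level : Int) : Prop := 0 ≤ half_level
instance (level : Int) (half_level : Int) : Decidable (Pre_balanced_indices_py level half_level) := by unfold Pre_balanced_indices_py; infer_instance
def pvWitness_balanced_indices_py : Int × Int := (4, 2)

def Spec_balanced_indices_py (level : Int) (half_level : Int) (out : List Int) : Prop := out = balanced_indices_py_alt level half_level
instance (level : Int) (half_level : Int) (out : List Int) : Decidable (Spec_balanced_indices_py level half_level out) := by unfold Spec_balanced_indices_py; infer_instance

-- ===== CLAIM (what is proved, stated in full; the proofs are below) =====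
def Claim_equal_balanced_indices_py : Prop := ∀ (level : Int) (half_level : Int), Dom_balanced_indices_py level half_level → Pre_balanced_indices_py level half_level → Spec_balanced_indices_py level half_level (balanced_indices_py level half_level)

-- ===== LEMMAS AND PROOFS =====

-- The common mathematical skeleton: gg n k enumerates, in ascending order, the
-- integers below 2^n whose binary expansion has exactly k ones.
def gg : Nat → Nat → List Int
  | _, 0 => [0]
  | 0, _+1 => []
  | n+1, k+1 => gg n (k+1) ++ (gg n k).map (fun x => (2:Int)^n + x)

theorem gg_bounds : ∀ (n k : Nat), ∀ x ∈ gg n k, 0 ≤ x ∧ x < (2:Int)^n := by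
  intro n
  induction n with
  | zero => intro k x hx; cases k <;> simp [gg] at hx <;> simp [hx]
  | succ n ih =>
    intro k x hx
    cases k with
    | zero => simp [gg] at hx; subst hx; exact ⟨le_refl 0, by positivity⟩
    | succ k =>
      simp only [gg, List.mem_append, List.mem_map] at hx
      rcases hx with hx | ⟨y, hy, rfl⟩
      · have := ih (k+1) x hx
        constructor
        · exact this.1
        · calc x < (2:Int)^n := this.2
            _ ≤ (2:Int)^(n+1) := by
              have : (0:Int) < 2^n := by positivity
              rw [pow_succ]; nlinarith
      · have := ih k y hy
        have h2 : (0:Int) < 2^n := by positivity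
        constructor
        · linarith [this.1]
        · rw [pow_succ]; nlinarith [this.2]

theorem gg_pairwise : ∀ (n k : Nat), (gg n k).Pairwise (· < ·) := by
  intro n
  induction n with
  | zero => intro k; cases k <;> simp [gg]
  | succ n ih =>
    intro k
    cases k with
    | zero => simp [gg]
    | succ k =>
      simp only [gg]
      rw [List.pairwise_append]
      refine ⟨ih (k+1), (List.pairwise_map).2 ?_, ?_⟩
      · exact (ih k).imp (by intro a b h; omega)
      · intro a ha b hb
        rcases List.mem_map.1 hb with ⟨y, hy, rfl⟩
        have h1 := gg_bounds n (k+1) a ha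
        have h2 := gg_bounds n k y hy
        linarith [h1.2, h2.1]

theorem gg_eq_nil : ∀ (n k : Nat), n < k → gg n k = [] := by
  intro n
  induction n with
  | zero => intro k h; match k, h with | k+1, _ => simp [gg]
  | succ n ih =>
    intro k h
    cases k with
    | zero => omega
    | succ k => simp [gg, ih (k+1) (by omega), ih k (by omega)]

theorem combosA_eq_combinations {α : Type} : ∀ (xs : List α) (r : Nat),
    combosA xs r = PySem.List.combinations xs r := by
  intro xs
  induction xs with
  | nil =>
    intro r
    cases r with
    | zero => rw [PySem.List.combinations_zero]; rfl
    | succ r => rw [PySem.List.combinations_nil_succ]; rfl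
  | cons x xs ih =>
    intro r
    cases r with
    | zero => rw [PySem.List.combinations_zero]; rfl
    | succ r =>
      rw [PySem.List.combinations_cons_succ, combosA, ih, ih]
      by_cases hlen : xs.length < r
      · have h1 : PySem.List.combinations xs r = [] := by
          apply PySem.List.combinations_eq_nil_of_length_lt; omega
        have h2 : PySem.List.combinations xs (r + 1) = [] := by
          apply PySem.List.combinations_eq_nil_of_length_lt; omega
        rw [if_pos hlen, h1, h2]
        simp
      · rw [if_neg hlen]

-- A-side core: mapping the bit-assembly fold over the combinations of
-- range(a, L) yields gg m k in reverse, where m = L - a.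
theorem combos_map_eq_gg_reverse : ∀ (m : Nat) (k : Nat) (a L : Int), a + m = L →
    (PySem.List.combinations (PySem.List.pyRange a L 1) k).map
      (fun ps => ps.foldl (fun idx pos => idx + (2 : Int) ^ (L - 1 - pos).toNat) 0)
    = (gg m k).reverse := by
  intro m
  induction m with
  | zero =>
    intro k a L hL
    have : PySem.List.pyRange a L 1 = [] := PySem.List.pyRange_one_eq_nil (by omega)
    rw [this]
    cases k with
    | zero => simp [PySem.List.combinations_zero, gg]
    | succ k => simp [PySem.List.combinations_nil_succ, gg]
  | succ m ih =>
    intro k a L hL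
    have hab : a < L := by omega
    rw [PySem.List.pyRange_one_cons hab]
    cases k with
    | zero => simp [PySem.List.combinations_zero, gg]
    | succ k =>
      rw [PySem.List.combinations_cons_succ]
      rw [List.map_append, List.map_map]
      have hexp : (L - 1 - a).toNat = m := by omega
      have h1 : ((fun ps => ps.foldl (fun idx pos => idx + (2 : Int) ^ (L - 1 - pos).toNat) 0) ∘ (a :: ·))
          = (fun ps => (2:Int)^m + ps.foldl (fun idx pos => idx + (2 : Int) ^ (L - 1 - pos).toNat) 0) := by
        funext ps
        simp only [Function.comp, List.foldl_cons, hexp]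
        rw [show (0 : Int) + 2^m = 2^m by ring]
        rw [PySem.List.foldl_add (g := fun pos => (2 : Int) ^ (L - 1 - pos).toNat) ps (2^m),
            PySem.List.foldl_add (g := fun pos => (2 : Int) ^ (L - 1 - pos).toNat) ps 0]
        ring
      rw [h1]
      have ih1 := ih k (a+1) L (by omega)
      have ih2 := ih (k+1) (a+1) L (by omega)
      rw [show (fun (ps : List Int) => (2:Int)^m + List.foldl (fun idx pos => idx + (2 : Int) ^ (L - 1 - pos).toNat) 0 ps)
            = (fun x => (2:Int)^m + x) ∘ (fun (ps : List Int) => List.foldl (fun idx pos => idx + (2 : Int) ^ (L - 1 - pos).toNat) 0 ps) from rfl]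
      rw [← List.map_map, ih1, ih2]
      simp [gg, List.reverse_append]

theorem portA_eq_gg (level half_level : Int) :
    balanced_indices_py level half_level = gg level.toNat half_level.toNat := by
  unfold balanced_indices_py
  rw [combosA_eq_combinations]
  by_cases hl : 0 ≤ level
  · rw [combos_map_eq_gg_reverse level.toNat half_level.toNat 0 level (by omega)]
    apply PySem.List.sorted_eq_of_perm_of_pairwise_lt
    · exact (List.reverse_perm _).symm
    · exact gg_pairwise level.toNat half_level.toNat
  · have hnil : PySem.List.pyRange 0 level 1 = [] := PySem.List.pyRange_one_eq_nil (by omega)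
    have hz : level.toNat = 0 := by omega
    rw [hnil, hz]
    cases hk : half_level.toNat with
    | zero => simp [PySem.List.combinations_zero, gg]; decide
    | succ k => simp [PySem.List.combinations_nil_succ, gg]; decide

-- B-side: a dict comprehension '{k: f k for k in ks}' looked up afterwards.
theorem getD_foldl_insert (ks : List Int) (f : Int → List Int)
    (acc : PySem.Dict Int (List Int)) (q : Int) :
    (ks.foldl (fun a k => a.insert k (f k)) acc).getD q []
      = if q ∈ ks then f q else acc.getD q [] := by
  induction ks generalizing acc with
  | nil => simp
  | cons k ks ih =>
    simp only [List.foldl_cons, ih, PySem.Dict.getD_insert, List.mem_cons]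
    split_ifs with h1 h2 h3 h4 <;> simp_all

-- Loop invariant of B's row dict: after processing lengths 1..N (N ≤ Lv, the
-- total length) the entry at a popcount q between the reachability lower bound
-- and half_level is gg N q; every other lookup defaults to [].
theorem portB_row_inv (half_level : Int) (Lv : Nat) (h1 : 1 ≤ half_level)
    (hL : half_level ≤ (Lv : Int)) : ∀ (N : Nat), N ≤ Lv → ∀ (q : Int),
    ((PySem.List.pyRange 1 ((N : Int) + 1) 1).foldl
      (fun row n =>
        let top := (2 : Int) ^ (n - 1).toNat
        let lo := max (half_level - ((Lv : Int) - n)) 0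
        (PySem.List.pyRange lo (min n half_level + 1) 1).foldl
          (fun acc k =>
            acc.insert k (row.getD k [] ++ (row.getD (k - 1) []).map (fun x => top + x)))
          PySem.Dict.empty)
      (PySem.Dict.empty.insert 0 [0])).getD q []
    = if max (half_level - ((Lv : Int) - N)) 0 ≤ q ∧ q ≤ half_level then gg N q.toNat
      else [] := by
  intro N
  induction N with
  | zero =>
    intro _ q
    rw [PySem.List.pyRange_one_eq_nil (by omega)]
    simp only [List.foldl_nil, PySem.Dict.getD_insert, PySem.Dict.getD_empty]
    split_ifs with h1' h2 <;> try rfl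
    · simp [h1', gg]
    · omega
    · have : 1 ≤ q.toNat := by omega
      rw [gg_eq_nil 0 q.toNat (by omega)]
  | succ N ih =>
    intro hNL q
    have ihN := ih (by omega)
    rw [show ((N + 1 : Nat) : Int) + 1 = ((N : Int) + 1) + 1 by push_cast; ring,
        PySem.List.pyRange_one_succ_right (by omega), List.foldl_append, List.foldl_cons,
        List.foldl_nil]
    rw [getD_foldl_insert]
    simp only [PySem.List.mem_pyRange_one]
    have htop : (2 : Int) ^ ((((N : Int) + 1) - 1).toNat) = (2:Int)^N := by
      rw [show (((N : Int) + 1) - 1).toNat = N by omega]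
    split_ifs with hin hq
    · rw [ihN q, ihN (q - 1), htop]
      rw [if_pos (⟨by omega, by omega⟩ :
            max (half_level - ((Lv : Int) - N)) 0 ≤ q ∧ q ≤ half_level)]
      by_cases hq1 : q = 0
      · subst hq1
        rw [if_neg (by omega)]
        simp [gg]
      · rw [if_pos (⟨by omega, by omega⟩ :
              max (half_level - ((Lv : Int) - N)) 0 ≤ q - 1 ∧ q - 1 ≤ half_level)]
        have hj : q.toNat = (q - 1).toNat + 1 := by omega
        rw [hj]
        simp only [gg]
    · omega
    · have hlt : ((N:Int) + 1) < q := by omega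
      rw [gg_eq_nil (N+1) q.toNat (by omega)]
      simp
    · simp

theorem gg_zero (n : Nat) : gg n 0 = [0] := by cases n <;> rfl

theorem portB_eq_gg (level half_level : Int) (h : 0 ≤ half_level) :
    balanced_indices_py_alt level half_level = gg level.toNat half_level.toNat := by
  unfold balanced_indices_py_alt
  simp only []
  have hmax : max level 0 = ((level.toNat : Int)) := (Int.ofNat_toNat level).symm
  by_cases hg1 : half_level < 0 ∨ half_level > max level 0
  · rw [if_pos hg1]
    rw [gg_eq_nil level.toNat half_level.toNat (by omega)]
  · rw [if_neg hg1]
    by_cases hg0 : half_level = 0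
    · rw [if_pos hg0, hg0]
      exact (gg_zero level.toNat).symm
    · rw [if_neg hg0, hmax]
      rw [portB_row_inv half_level level.toNat (by omega) (by omega) level.toNat
            (le_refl _) half_level]
      rw [if_pos ⟨by omega, le_refl _⟩]

-- ===== VERDICT (by name: the statement is the Claim_ definition above) =====
theorem balanced_indices_py_spec : Claim_equal_balanced_indices_py := by
  intro level half_level _ hpre
  unfold Spec_balanced_indices_py
  rw [portA_eq_gg level half_level, portB_eq_gg level half_level hpre]
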